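-- pv_equiv track=rewrite | github.com/biancaganescu/pretraining-playground | checkpoint_metric_computation.py | get_checkpoint_step_to_range_indices
-- ===== SOURCE A (Python) =====
-- def get_checkpoint_step_to_range_indices(dataset):
--     """
--     Get the range indices for each checkpoint step in the dataset
--     """
--
--     checkpoint_steps = dataset['checkpoint_step']
--
--     checkpoint_step_to_range_indices = {}
--
--     _target_checkpoint_step = checkpoint_steps[0]
--     _target_checkpoint_start_idx = 0
--     for idx, _curr_checkpoint_step in enumerate(checkpoint_steps):
--         if _curr_checkpoint_step != _target_checkpoint_step:
--             checkpoint_step_to_range_indices[_target_checkpoint_step] = (_target_checkpoint_start_idx, idx)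
--             _target_checkpoint_step = _curr_checkpoint_step
--             _target_checkpoint_start_idx = idx
--     else:
--         checkpoint_step_to_range_indices[_target_checkpoint_step] = (_target_checkpoint_start_idx, idx+1)
--
--     return checkpoint_step_to_range_indices
-- ===== SOURCE B (Python) =====
-- def get_checkpoint_step_to_range_indices(dataset):
--     """
--     Get the range indices for each checkpoint step in the dataset
--     """
--     steps = dataset['checkpoint_step']
--     result = {}
--     i = 0
--     n = len(steps)
--     while i < n:
--         j = i + 1
--         while j < n and steps[j] == steps[i]:
--             j += 1
--         result[steps[i]] = (i, j)
--         i = j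
--     return result
-- ===== Notes on version B (the rewrite author's own statement) =====
-- stated objective: simpler
-- what changed: Replaces the enumerate loop with change-point detection and trailing for-else flush by an outer loop over whole runs: an inner scan finds the end of each run of equal steps and the block (i, j) is recorded directly, with no target/start state variables and no post-loop flush.
-- crash fix: On a dataset whose 'checkpoint_step' list is empty, A raises IndexError (it reads checkpoint_steps[0] before the loop) while B returns the empty dict {}. — e.g. on get_checkpoint_step_to_range_indices([("checkpoint_step", [])]): A raises IndexError, B returns []
import Mathlib
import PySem

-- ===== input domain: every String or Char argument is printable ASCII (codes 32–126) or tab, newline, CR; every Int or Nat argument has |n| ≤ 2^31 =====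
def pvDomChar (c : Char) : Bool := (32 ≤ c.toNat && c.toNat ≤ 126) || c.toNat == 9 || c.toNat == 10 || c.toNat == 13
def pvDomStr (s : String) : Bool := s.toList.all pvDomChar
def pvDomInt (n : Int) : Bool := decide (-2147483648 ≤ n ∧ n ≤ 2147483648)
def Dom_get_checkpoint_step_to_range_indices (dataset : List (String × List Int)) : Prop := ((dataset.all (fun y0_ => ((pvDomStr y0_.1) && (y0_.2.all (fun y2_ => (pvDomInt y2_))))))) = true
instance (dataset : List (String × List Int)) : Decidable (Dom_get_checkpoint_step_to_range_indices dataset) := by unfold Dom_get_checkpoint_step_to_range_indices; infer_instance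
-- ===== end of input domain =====

-- B replaces A's change-point loop (enumerate + target/start state + for-else flush)
-- by an outer loop over whole runs of equal steps; same return value on Pre_.
-- (Where A raises IndexError on an empty 'checkpoint_step' list, B returns the empty dict.)


-- ===== PORT A =====
-- A's for-loop over enumerate(checkpoint_steps): state (dict, target step, target start);
-- the base case is the for-else clause (at that point idx = length of the list, i.e. last idx + 1).
def pvAGo (d : PySem.Dict Int (Int × Int)) (tgt start idx : Int) :
    List Int → PySem.Dict Int (Int × Int)
  | [] => d.insert tgt (start, idx)
  | c :: t =>
    if c ≠ tgt then pvAGo (d.insert tgt (start, idx)) c idx (idx + 1) t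
    else pvAGo d tgt start (idx + 1) t

def get_checkpoint_step_to_range_indices (dataset : List (String × List Int)) : List (Int × Int × Int) :=
  match (PySem.Dict.mk dataset).get? "checkpoint_step" with
  | none => []                    -- KeyError in Python (outside Pre_)
  | some [] => []                 -- IndexError in Python (outside Pre_)
  | some (s0 :: rest) => (pvAGo PySem.Dict.empty s0 0 0 (s0 :: rest)).items

-- ===== PORT B =====
-- Source B's inner while scans forward while steps[j] == steps[i]: run length and remainder.
def pvRunLen (x : Int) : List Int → Nat
  | [] => 0
  | y :: t => if y = x then 1 + pvRunLen x t else 0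

def pvRunRest (x : Int) : List Int → List Int
  | [] => []
  | y :: t => if y = x then pvRunRest x t else y :: t

-- Source B's outer while: one iteration per run; i is the running offset.
-- fuel (≥ number of runs, we pass the list length) only makes the recursion structural.
def pvBGo : Nat → PySem.Dict Int (Int × Int) → Int → List Int → PySem.Dict Int (Int × Int)
  | _, d, _, [] => d
  | 0, d, _, _ :: _ => d          -- unreachable: fuel ≥ number of runs
  | fuel + 1, d, i, h :: t =>
      let j := i + 1 + (pvRunLen h t : Int)
      pvBGo fuel (d.insert h (i, j)) j (pvRunRest h t)

def get_checkpoint_step_to_range_indices_alt (dataset : List (String × List Int)) : List (Int × Int × Int) :=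
  match (PySem.Dict.mk dataset).get? "checkpoint_step" with
  | none => []                    -- KeyError in Python
  | some steps => (pvBGo steps.length PySem.Dict.empty 0 steps).items

-- ===== PRECONDITION & SPEC =====
-- Pre_ excludes the inputs on which A raises: a missing 'checkpoint_step' key (KeyError)
-- and an empty 'checkpoint_step' list (IndexError on checkpoint_steps[0]).
def Pre_get_checkpoint_step_to_range_indices (dataset : List (String × List Int)) : Prop :=
  ((PySem.Dict.mk dataset).get? "checkpoint_step").getD [] ≠ []
instance (dataset : List (String × List Int)) : Decidable (Pre_get_checkpoint_step_to_range_indices dataset) := by unfold Pre_get_checkpoint_step_to_range_indices; infer_instance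

def pvWitness_get_checkpoint_step_to_range_indices : (List (String × List Int)) :=
  [("checkpoint_step", [1, 1, 2])]

-- On a dataset whose 'checkpoint_step' list is empty, A raises IndexError while B returns {}
-- (proved below as theorem get_checkpoint_step_to_range_indices_raises).
def Raises_get_checkpoint_step_to_range_indices (dataset : List (String × List Int)) : Prop :=
  (PySem.Dict.mk dataset).get? "checkpoint_step" = some []
instance (dataset : List (String × List Int)) : Decidable (Raises_get_checkpoint_step_to_range_indices dataset) := by unfold Raises_get_checkpoint_step_to_range_indices; infer_instance
def pvRaiseWitness_get_checkpoint_step_to_range_indices : (List (String × List Int)) :=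
  [("checkpoint_step", [])]
def pvRaiseWitnessOut_get_checkpoint_step_to_range_indices : List (Int × Int × Int) := []

def Spec_get_checkpoint_step_to_range_indices (dataset : List (String × List Int)) (out : List (Int × Int × Int)) : Prop := out = get_checkpoint_step_to_range_indices_alt dataset
instance (dataset : List (String × List Int)) (out : List (Int × Int × Int)) : Decidable (Spec_get_checkpoint_step_to_range_indices dataset out) := by unfold Spec_get_checkpoint_step_to_range_indices; infer_instance

-- ===== CLAIM (what is proved, stated in full; the proofs are below) =====
def Claim_equal_get_checkpoint_step_to_range_indices : Prop := ∀ (dataset : List (String × List Int)), Dom_get_checkpoint_step_to_range_indices dataset → Pre_get_checkpoint_step_to_range_indices dataset → Spec_get_checkpoint_step_to_range_indices dataset (get_checkpoint_step_to_range_indices dataset)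

def Claim_raises_get_checkpoint_step_to_range_indices : Prop := (∀ (dataset : List (String × List Int)), Dom_get_checkpoint_step_to_range_indices dataset → Raises_get_checkpoint_step_to_range_indices dataset → ¬ Pre_get_checkpoint_step_to_range_indices dataset) ∧ (Dom_get_checkpoint_step_to_range_indices (pvRaiseWitness_get_checkpoint_step_to_range_indices) ∧ Raises_get_checkpoint_step_to_range_indices (pvRaiseWitness_get_checkpoint_step_to_range_indices) ∧ get_checkpoint_step_to_range_indices_alt (pvRaiseWitness_get_checkpoint_step_to_range_indices) = pvRaiseWitnessOut_get_checkpoint_step_to_range_indices)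

-- ===== LEMMAS AND PROOFS =====

theorem pvRunLen_replicate (x : Int) (m : Nat) :
    pvRunLen x (List.replicate m x) = m := by
  induction m with
  | zero => rfl
  | succ m ih => simp [List.replicate_succ, pvRunLen, ih]; omega

theorem pvRunRest_replicate (x : Int) (m : Nat) :
    pvRunRest x (List.replicate m x) = [] := by
  induction m with
  | zero => rfl
  | succ m ih => simp [List.replicate_succ, pvRunRest, ih]

theorem pvRunLen_replicate_append (x c : Int) (m : Nat) (t : List Int) (h : c ≠ x) :
    pvRunLen x (List.replicate m x ++ c :: t) = m := by
  induction m with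
  | zero => simp [pvRunLen, h]
  | succ m ih => simp [List.replicate_succ, pvRunLen, ih]; omega

theorem pvRunRest_replicate_append (x c : Int) (m : Nat) (t : List Int) (h : c ≠ x) :
    pvRunRest x (List.replicate m x ++ c :: t) = c :: t := by
  induction m with
  | zero => simp [pvRunRest, h]
  | succ m ih => simp [List.replicate_succ, pvRunRest, ih]

-- Loop correspondence: mid-run, A has seen k copies of tgt since start; B would see them
-- at the head of its current list.
theorem pvGo_eq (l : List Int) : ∀ (k fuel : Nat) (d : PySem.Dict Int (Int × Int)) (tgt start : Int),
    (1 ≤ k ∨ l.head? = some tgt) → k + l.length ≤ fuel →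
    pvAGo d tgt start (start + k) l = pvBGo fuel d start (List.replicate k tgt ++ l) := by
  induction l with
  | nil =>
    intro k fuel d tgt start h hf
    rcases h with h | h
    · obtain ⟨m, rfl⟩ : ∃ m, k = m + 1 := ⟨k - 1, by omega⟩
      obtain ⟨f, rfl⟩ : ∃ f, fuel = f + 1 := ⟨fuel - 1, by omega⟩
      rw [List.append_nil, List.replicate_succ, pvBGo]
      simp only [pvRunLen_replicate, pvRunRest_replicate, pvBGo, pvAGo]
      congr 2
      push_cast
      ring
    · simp at h
  | cons c t ih =>
    intro k fuel d tgt start h hf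
    by_cases hc : c = tgt
    · subst hc
      rw [show List.replicate k c ++ c :: t = List.replicate (k + 1) c ++ t by
            simp [List.replicate_succ', List.append_assoc]]
      rw [pvAGo]
      simp only [ne_eq, not_true_eq_false, ite_false]
      have := ih (k + 1) fuel d c start (Or.inl (by omega)) (by simp at hf ⊢; omega)
      rw [show start + (k : Int) + 1 = start + ((k + 1 : Nat) : Int) by push_cast; ring]
      exact this
    · have hk : 1 ≤ k := by
        rcases h with h | h
        · exact h
        · simp at h; omega
      obtain ⟨m, rfl⟩ : ∃ m, k = m + 1 := ⟨k - 1, by omega⟩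
      obtain ⟨f, rfl⟩ : ∃ f, fuel = f + 1 := ⟨fuel - 1, by omega⟩
      rw [pvAGo, if_pos hc]
      rw [show List.replicate (m + 1) tgt ++ c :: t
            = tgt :: (List.replicate m tgt ++ c :: t) by simp [List.replicate_succ]]
      rw [pvBGo]
      simp only [pvRunLen_replicate_append tgt c m t hc,
                 pvRunRest_replicate_append tgt c m t hc]
      have := ih 1 f (d.insert tgt (start, start + 1 + (m : Int)))
                 c (start + 1 + (m : Int)) (Or.inl le_rfl) (by simp at hf ⊢; omega)
      simp only [List.replicate_one, Nat.cast_one, List.singleton_append] at this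
      rw [show start + ((m + 1 : Nat) : Int) + 1 = start + 1 + (m : Int) + 1 by push_cast; ring,
          show start + ((m + 1 : Nat) : Int) = start + 1 + (m : Int) by push_cast; ring]
      exact this

-- ===== VERDICT (by name: the statement is the Claim_ definition above) =====
theorem get_checkpoint_step_to_range_indices_spec : Claim_equal_get_checkpoint_step_to_range_indices := by
  intro dataset _ hpre
  unfold Spec_get_checkpoint_step_to_range_indices
  unfold Pre_get_checkpoint_step_to_range_indices at hpre
  unfold get_checkpoint_step_to_range_indices get_checkpoint_step_to_range_indices_alt
  cases hget : (PySem.Dict.mk dataset).get? "checkpoint_step" with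
  | none => simp [hget] at hpre
  | some steps =>
    cases steps with
    | nil => simp [hget] at hpre
    | cons s0 rest =>
      show (pvAGo PySem.Dict.empty s0 0 0 (s0 :: rest)).items
          = (pvBGo (s0 :: rest).length PySem.Dict.empty 0 (s0 :: rest)).items
      have := pvGo_eq (s0 :: rest) 0 (s0 :: rest).length PySem.Dict.empty s0 0 (Or.inr rfl)
        (by simp)
      simp only [Nat.cast_zero, add_zero, List.replicate_zero, List.nil_append] at this
      rw [this]

theorem get_checkpoint_step_to_range_indices_raises : Claim_raises_get_checkpoint_step_to_range_indices := by
  unfold Claim_raises_get_checkpoint_step_to_range_indices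
  constructor
  · intro dataset _ hr
    unfold Raises_get_checkpoint_step_to_range_indices at hr
    unfold Pre_get_checkpoint_step_to_range_indices
    simp [hr]
  · exact ⟨by decide, by decide, by decide⟩

-- self-check: the raise witness indeed lies outside Pre_ (corollary of get_checkpoint_step_to_range_indices_raises)
theorem pvRaiseWitness_outside_Pre_ok : ¬ Pre_get_checkpoint_step_to_range_indices pvRaiseWitness_get_checkpoint_step_to_range_indices :=
  get_checkpoint_step_to_range_indices_raises.1 _ get_checkpoint_step_to_range_indices_raises.2.1 get_checkpoint_step_to_range_indices_raises.2.2.1
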